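-- pv_equiv track=rewrite | github.com/znsyhandao/ai-auto-perception-audit-tool | implement_v2_optimizations.py | _simplify_imports
-- ===== SOURCE A (Python) =====
-- def _simplify_imports(content: str) -> str:
--     """简化导入语句"""
--     lines = content.split('\n')
--     optimized_lines = []
--
--     i = 0
--     while i < len(lines):
--         line = lines[i]
--
--         # 合并连续的from导入
--         if line.strip().startswith("from ") and "import" in line:
--             # 检查下一行是否也是from导入
--             if i + 1 < len(lines) and lines[i+1].strip().startswith("from "):
--                 # 简单合并：保留第一个
--                 optimized_lines.append(line)
--                 i += 1
--                 while i < len(lines) and lines[i].strip().startswith("from "):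
--                     i += 1  # 跳过后续的from导入
--                 continue
--
--         optimized_lines.append(line)
--         i += 1
--
--     return '\n'.join(optimized_lines)
-- ===== SOURCE B (Python) =====
-- from itertools import groupby
--
--
-- def _simplify_imports(content: str) -> str:
--     """简化导入语句 — group-then-prune rewrite of the index-walking original."""
--     kept = []
--     for is_from, run in groupby(content.split('\n'),
--                                 key=lambda l: l.strip().startswith("from ")):
--         grp = list(run)
--         if is_from:
--             k = next((idx for idx, l in enumerate(grp) if "import" in l), None)
--             if k is not None:
--                 grp = grp[:k + 1]
--         kept.extend(grp)
--     return '\n'.join(kept)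
-- ===== Notes on version B (the rewrite author's own statement) =====
-- stated objective: idiomatic
-- what changed: Replaces A's index-walking while-loop with nested skip loop by a group-then-prune pass: partition lines into maximal runs by the from-prefix key (itertools.groupby) and truncate each from-run after its first import-bearing line.
import Mathlib
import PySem

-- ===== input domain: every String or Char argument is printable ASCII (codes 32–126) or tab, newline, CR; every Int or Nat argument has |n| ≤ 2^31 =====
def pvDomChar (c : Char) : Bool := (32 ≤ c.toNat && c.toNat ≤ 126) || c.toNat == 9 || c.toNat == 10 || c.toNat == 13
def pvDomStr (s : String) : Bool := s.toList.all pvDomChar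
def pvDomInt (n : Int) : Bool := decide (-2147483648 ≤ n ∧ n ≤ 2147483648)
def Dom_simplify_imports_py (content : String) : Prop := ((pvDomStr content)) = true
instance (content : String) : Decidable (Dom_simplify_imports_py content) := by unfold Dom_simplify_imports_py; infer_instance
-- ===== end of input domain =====

-- B replaces A's index-walking loop with a group-then-prune pass (same cost, more idiomatic); same return value.


-- shared line predicates: line.strip().startswith("from ")  /  "import" in line
def pvIsFrom (l : String) : Bool := PySem.Str.startswith (PySem.Str.strip l) "from "
def pvHasImport (l : String) : Bool := PySem.Str.isIn "import" l

-- content.split('\n')  (exact: PySem.Chars.splitOn is Python's str.split with a non-empty separator)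
def pvSplitLines (content : String) : List String :=
  (PySem.Chars.splitOn content.toList "\n".toList).map String.ofList

-- ===== PORT A =====
-- inner 'while i < len(lines) and lines[i].strip().startswith("from "): i += 1'
def pvSkipFrom : List String → List String
  | [] => []
  | l :: rest => if pvIsFrom l then pvSkipFrom rest else l :: rest

-- termination fact the port's decreasing_by cites
theorem pvSkipFrom_length_le (xs : List String) : (pvSkipFrom xs).length ≤ xs.length := by
  induction xs with
  | nil => simp [pvSkipFrom]
  | cons l rest ih =>
    simp only [pvSkipFrom]; split
    · exact Nat.le_trans ih (Nat.le_succ _)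
    · exact Nat.le_refl _

-- the main 'while i < len(lines)' loop of A
def pvALoop : List String → List String
  | [] => []
  | line :: rest =>
    if pvIsFrom line && pvHasImport line then
      match rest with
      | next :: t =>
        if pvIsFrom next then
          line :: pvALoop (pvSkipFrom (next :: t))
        else
          line :: pvALoop (next :: t)
      | [] => line :: pvALoop []
    else
      line :: pvALoop rest
termination_by lines => lines.length
decreasing_by
  · exact Nat.lt_succ_of_le (pvSkipFrom_length_le _)
  · simp
  · simp
  · simp

def simplify_imports_py (content : String) : String :=
  PySem.Str.join "\n" (pvALoop (pvSplitLines content))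

-- ===== PORT B =====
-- itertools.groupby(lines, key=pvIsFrom): maximal runs of equal key, in order
-- (built back-to-front: pvRunsStep prepends one line to the runs of the rest)
def pvRunsStep (kl : Bool) (l : String) : List (Bool × List String) → List (Bool × List String)
  | [] => [(kl, [l])]
  | (k, grp) :: more => if kl == k then (k, l :: grp) :: more else (kl, [l]) :: (k, grp) :: more

def pvRunsBy : List String → List (Bool × List String)
  | [] => []
  | l :: rest => pvRunsStep (pvIsFrom l) l (pvRunsBy rest)

-- for a from-run: keep up to and including the first line containing 'import'
def pvPrune (g : Bool × List String) : List String :=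
  if g.1 then
    match g.2.findIdx? (fun l => pvHasImport l) with
    | none => g.2
    | some k => g.2.take (k + 1)
  else g.2

def simplify_imports_py_alt (content : String) : String :=
  PySem.Str.join "\n" ((pvRunsBy (pvSplitLines content)).flatMap pvPrune)

-- ===== PRECONDITION & SPEC =====
def Spec_simplify_imports_py (content : String) (out : String) : Prop := out = simplify_imports_py_alt content
instance (content : String) (out : String) : Decidable (Spec_simplify_imports_py content out) := by unfold Spec_simplify_imports_py; infer_instance

-- ===== CLAIM (what is proved, stated in full; the proofs are below) =====
def Claim_equal_simplify_imports_py : Prop := ∀ (content : String), Dom_simplify_imports_py content → Spec_simplify_imports_py content (simplify_imports_py content)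

-- ===== LEMMAS AND PROOFS =====

-- equation lemmas for the well-founded pvALoop
theorem pvALoop_nil : pvALoop [] = [] := by simp [pvALoop]

theorem pvALoop_cons_plain (l : String) (rest : List String)
    (h : (pvIsFrom l && pvHasImport l) = false) :
    pvALoop (l :: rest) = l :: pvALoop rest := by
  cases rest <;> simp [pvALoop, h]

theorem pvALoop_cons_skip (l next : String) (t : List String)
    (hl : pvIsFrom l = true) (hi : pvHasImport l = true) (hn : pvIsFrom next = true) :
    pvALoop (l :: next :: t) = l :: pvALoop (pvSkipFrom (next :: t)) := by
  simp [pvALoop, hl, hi, hn]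

theorem pvALoop_cons_noskip (l next : String) (t : List String)
    (hl : pvIsFrom l = true) (hi : pvHasImport l = true) (hn : pvIsFrom next = false) :
    pvALoop (l :: next :: t) = l :: pvALoop (next :: t) := by
  simp [pvALoop, hl, hi, hn]

theorem pvALoop_single (l : String) (hl : pvIsFrom l = true) (hi : pvHasImport l = true) :
    pvALoop [l] = [l] := by
  simp [pvALoop, hl, hi, pvALoop_nil]

-- B's list-level pipeline
def pvBList (lines : List String) : List String := (pvRunsBy lines).flatMap pvPrune

theorem pvSkipFrom_eq_dropWhile (xs : List String) : pvSkipFrom xs = xs.dropWhile pvIsFrom := by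
  induction xs with
  | nil => rfl
  | cons l rest ih => simp only [pvSkipFrom, List.dropWhile_cons]; split_ifs <;> simp_all

theorem pvRunsBy_head (h : String) (t : List String) :
    ∃ g more, pvRunsBy (h :: t) = (pvIsFrom h, h :: g) :: more := by
  rw [pvRunsBy]
  cases hr : pvRunsBy t with
  | nil => exact ⟨[], [], by simp [pvRunsStep]⟩
  | cons p more =>
    obtain ⟨k, grp⟩ := p
    by_cases hk : pvIsFrom h = k
    · exact ⟨grp, more, by simp [pvRunsStep, hk]⟩
    · exact ⟨[], (k, grp) :: more, by simp [pvRunsStep, hk]⟩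

theorem pvRunsBy_split (l : String) (rest : List String) (hl : pvIsFrom l = true) :
    pvRunsBy (l :: rest) =
      (true, l :: rest.takeWhile pvIsFrom) :: pvRunsBy (rest.dropWhile pvIsFrom) := by
  induction rest generalizing l with
  | nil => simp [pvRunsBy, pvRunsStep, hl]
  | cons h t ih =>
    by_cases hh : pvIsFrom h = true
    · have ihh := ih h hh
      rw [pvRunsBy, ihh]
      simp [pvRunsStep, hl, hh]
    · have hh' : pvIsFrom h = false := by simp_all
      rw [pvRunsBy]
      obtain ⟨g, more, hr⟩ := pvRunsBy_head h t
      rw [hr]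
      simp [pvRunsStep, hl, hh', hr]

theorem pvBList_cons_false (l : String) (rest : List String) (hl : pvIsFrom l = false) :
    pvBList (l :: rest) = l :: pvBList rest := by
  unfold pvBList
  rw [pvRunsBy]
  cases hr : pvRunsBy rest with
  | nil => simp [pvRunsStep, pvPrune, hl]
  | cons p more =>
    obtain ⟨k, grp⟩ := p
    cases k with
    | true => simp [pvRunsStep, hl, pvPrune]
    | false => simp [pvRunsStep, hl, pvPrune]

theorem pvBList_cons_true_noimp (l : String) (rest : List String)
    (hl : pvIsFrom l = true) (hi : pvHasImport l = false) :
    pvBList (l :: rest) = l :: pvBList rest := by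
  unfold pvBList
  rw [pvRunsBy]
  cases hr : pvRunsBy rest with
  | nil => simp [pvRunsStep, pvPrune, hl, List.findIdx?_cons, hi]
  | cons p more =>
    obtain ⟨k, grp⟩ := p
    cases k with
    | false => simp [pvRunsStep, hl, pvPrune, List.findIdx?_cons, hi]
    | true =>
      simp only [pvRunsStep, hl, show (true == true) = true from rfl, if_true,
        List.flatMap_cons, pvPrune, List.findIdx?_cons, hi]
      cases hf : grp.findIdx? (fun l => pvHasImport l) with
      | none => simp
      | some k => simp [List.take_succ_cons]

theorem pvMain : ∀ n (lines : List String), lines.length ≤ n → pvALoop lines = pvBList lines := by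
  intro n
  induction n with
  | zero =>
    intro lines hlen
    have h0 : lines = [] := List.eq_nil_of_length_eq_zero (Nat.le_zero.mp hlen)
    subst h0
    rw [pvALoop_nil]; rfl
  | succ n ih =>
    intro lines hlen
    cases lines with
    | nil => rw [pvALoop_nil]; rfl
    | cons l rest =>
      simp only [List.length_cons, Nat.succ_le_succ_iff] at hlen
      by_cases hf : pvIsFrom l = true
      · by_cases hi : pvHasImport l = true
        · -- from + import
          cases rest with
          | nil =>
            rw [pvALoop_single l hf hi]
            simp [pvBList, pvRunsBy, pvRunsStep, pvPrune, List.findIdx?_cons, hi]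
          | cons next t =>
            by_cases hn : pvIsFrom next = true
            · -- skip the remainder of the from-run
              rw [pvALoop_cons_skip l next t hf hi hn]
              have hdrop := pvRunsBy_split l (next :: t) hf
              have hp : pvPrune (true, l :: (next :: t).takeWhile pvIsFrom) = [l] := by
                simp [pvPrune, List.findIdx?_cons, hi]
              have hle : ((next :: t).dropWhile pvIsFrom).length ≤ n :=
                Nat.le_trans (List.length_dropWhile_le _ _) hlen
              rw [pvSkipFrom_eq_dropWhile, ih _ hle]
              unfold pvBList
              rw [hdrop]
              simp only [List.flatMap_cons, hp, List.singleton_append]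
            · -- next line is not a from line: plain append
              have hn' : pvIsFrom next = false := by simp_all
              rw [pvALoop_cons_noskip l next t hf hi hn', ih _ hlen]
              obtain ⟨g, more, hr⟩ := pvRunsBy_head next t
              unfold pvBList
              rw [hr, pvRunsBy, hr]
              have hp : pvPrune (true, [l]) = [l] := by
                simp [pvPrune, List.findIdx?_cons, hi]
              simp [pvRunsStep, hn', hf, hp]
        · -- from, no import
          have hi' : pvHasImport l = false := by simp_all
          rw [pvALoop_cons_plain l rest (by simp [hf, hi']),
            ih _ hlen, pvBList_cons_true_noimp l rest hf hi']
      · have hf' : pvIsFrom l = false := by simp_all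
        rw [pvALoop_cons_plain l rest (by simp [hf']),
          ih _ hlen, pvBList_cons_false l rest hf']

-- ===== VERDICT (by name: the statement is the Claim_ definition above) =====
theorem simplify_imports_py_spec : Claim_equal_simplify_imports_py := by
  intro content _
  unfold Spec_simplify_imports_py simplify_imports_py simplify_imports_py_alt
  rw [pvMain (pvSplitLines content).length _ (Nat.le_refl _)]
  rfl
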